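-- pv_equiv track=rewrite | github.com/AgeeKey/Mirai | mirai-agent/core/task_planning/validation.py | _check_resource_availability
-- ===== SOURCE A (Python) =====
-- from typing import Any, Dict, List, Optional, Tuple
--
-- def _check_resource_availability(
--
--     plan: Dict,
--     available: Dict
-- ) -> bool:
--     """Проверяет доступность ресурсов"""
--     required_resources = set()
--     for task in plan.get('tasks', []):
--         required_resources.update(task.get('required_resources', []))
--
--     for resource in required_resources:
--         if resource not in available.get('resources', []):
--             return False
--
--     return True
-- ===== SOURCE B (Python) =====
-- def _check_resource_availability(plan, available):
--     """Sort-then-merge subset check: sort the deduplicated required and available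
--     resource names and verify inclusion with a single linear two-pointer scan."""
--     required = sorted({r for task in plan.get('tasks', [])
--                          for r in task.get('required_resources', [])})
--     avail = sorted(set(available.get('resources', [])))
--     i = 0
--     for r in required:
--         while i < len(avail) and avail[i] < r:
--             i += 1
--         if i == len(avail) or avail[i] != r:
--             return False
--     return True
-- ===== Notes on version B (the rewrite author's own statement) =====
-- stated objective: alternative
-- what changed: B replaces A's per-resource linear membership scans over the available list by sorting both deduplicated name lists and checking inclusion with one two-pointer merge pass.
import Mathlib
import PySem

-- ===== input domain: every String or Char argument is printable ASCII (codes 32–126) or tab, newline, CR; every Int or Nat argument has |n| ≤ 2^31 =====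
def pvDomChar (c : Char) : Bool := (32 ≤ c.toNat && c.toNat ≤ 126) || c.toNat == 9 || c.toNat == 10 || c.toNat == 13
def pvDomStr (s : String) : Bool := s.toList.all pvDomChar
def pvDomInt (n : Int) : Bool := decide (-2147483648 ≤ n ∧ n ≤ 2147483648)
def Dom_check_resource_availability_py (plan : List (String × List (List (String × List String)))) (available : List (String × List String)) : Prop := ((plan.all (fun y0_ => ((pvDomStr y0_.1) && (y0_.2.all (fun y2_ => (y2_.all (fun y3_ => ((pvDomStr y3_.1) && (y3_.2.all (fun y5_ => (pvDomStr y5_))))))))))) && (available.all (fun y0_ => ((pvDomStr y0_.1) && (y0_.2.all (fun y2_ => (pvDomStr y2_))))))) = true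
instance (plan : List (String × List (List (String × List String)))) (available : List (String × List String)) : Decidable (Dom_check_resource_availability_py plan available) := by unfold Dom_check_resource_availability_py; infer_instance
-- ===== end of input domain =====

-- B replaces A's per-resource linear membership scans by sorting both deduplicated
-- name lists and checking inclusion with a single two-pointer merge pass (objective: alternative).

-- ===== PORT A =====
-- literal port of A: build the set of all required resources, then check each against available['resources']
def check_resource_availability_py (plan : List (String × List (List (String × List String)))) (available : List (String × List String)) : Bool :=
  let required_resources : PySem.Set String :=
    (PySem.Dict.getD (PySem.Dict.mk plan) "tasks" []).foldl
      (fun s task => PySem.Set.update s (PySem.Dict.getD (PySem.Dict.mk task) "required_resources" []))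
      PySem.Set.empty
  -- the 'for resource in required_resources: if resource not in …: return False / return True' loop
  -- (result is order-independent, so iterating the Set as a list is exact)
  required_resources.all (fun resource => (PySem.Dict.getD (PySem.Dict.mk available) "resources" []).contains resource)

-- ===== PORT B =====
-- B's two-pointer scan: 'i' advancing over avail is the successive suffix of avail
def subsetMerge : List String → List String → Bool
  | [], _ => true
  | _ :: _, [] => false
  | r :: rs, a :: as =>
    if a < r then subsetMerge (r :: rs) as
    else if a == r then subsetMerge rs (a :: as)
    else false
termination_by req avail => (req.length, avail.length)

-- port of B: sort the deduplicated required and available names, then one merge pass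
def check_resource_availability_py_alt (plan : List (String × List (List (String × List String)))) (available : List (String × List String)) : Bool :=
  let required : List String :=
    PySem.List.sorted
      (PySem.Set.ofList ((PySem.Dict.getD (PySem.Dict.mk plan) "tasks" []).flatMap
        (fun task => PySem.Dict.getD (PySem.Dict.mk task) "required_resources" [])))
      (fun x => x) false
  let avail : List String :=
    PySem.List.sorted
      (PySem.Set.ofList (PySem.Dict.getD (PySem.Dict.mk available) "resources" []))
      (fun x => x) false
  subsetMerge required avail

-- ===== PRECONDITION & SPEC =====
def Spec_check_resource_availability_py (plan : List (String × List (List (String × List String)))) (available : List (String × List String)) (out : Bool) : Prop := out = check_resource_availability_py_alt plan available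
instance (plan : List (String × List (List (String × List String)))) (available : List (String × List String)) (out : Bool) : Decidable (Spec_check_resource_availability_py plan available out) := by unfold Spec_check_resource_availability_py; infer_instance

-- ===== CLAIM =====
def Claim_equal_check_resource_availability_py : Prop := ∀ (plan : List (String × List (List (String × List String)))) (available : List (String × List String)), Dom_check_resource_availability_py plan available → Spec_check_resource_availability_py plan available (check_resource_availability_py plan available)

-- ===== LEMMAS AND PROOFS =====
-- on sorted lists the merge scan decides exactly 'every required name occurs in avail'
theorem subsetMerge_eq_all (req avail : List String)
    (hr : req.Pairwise (· ≤ ·)) (ha : avail.Pairwise (· ≤ ·)) :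
    subsetMerge req avail = req.all (fun r => avail.contains r) := by
  induction req generalizing avail with
  | nil => simp [subsetMerge]
  | cons r rs ihr =>
    induction avail with
    | nil => simp [subsetMerge]
    | cons a as iha =>
      have hr' : rs.Pairwise (· ≤ ·) := hr.of_cons
      have hrle : ∀ x ∈ rs, r ≤ x := by
        intro x hx; exact List.rel_of_pairwise_cons hr hx
      have ha' : as.Pairwise (· ≤ ·) := ha.of_cons
      have hale : ∀ x ∈ as, a ≤ x := by
        intro x hx; exact List.rel_of_pairwise_cons ha hx
      by_cases hlt : a < r
      · rw [show subsetMerge (r :: rs) (a :: as) = subsetMerge (r :: rs) as by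
          simp [subsetMerge, hlt]]
        rw [iha ha']
        rw [Bool.eq_iff_iff]
        simp only [List.all_eq_true, List.contains_iff_mem]
        constructor
        · intro h x hx
          exact List.mem_cons_of_mem a (h x hx)
        · intro h x hx
          rcases List.mem_cons.mp (h x hx) with heq2 | hmem
          · have hrx : r ≤ x := by
              rcases List.mem_cons.mp hx with rfl | hx'
              · exact le_refl x
              · exact hrle x hx'
            exact absurd heq2 (lt_of_lt_of_le hlt hrx).ne'
          · exact hmem
      · by_cases heq : a = r
        · rw [show subsetMerge (r :: rs) (a :: as) = subsetMerge rs (a :: as) by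
            simp [subsetMerge, heq]]
          rw [ihr (a :: as) hr' ha]
          rw [Bool.eq_iff_iff]
          simp only [List.all_eq_true, List.contains_iff_mem]
          constructor
          · intro h x hx
            rcases List.mem_cons.mp hx with rfl | hx'
            · exact heq ▸ List.mem_cons_self
            · exact h x hx'
          · intro h x hx
            exact h x (List.mem_cons_of_mem r hx)
        · have hgt : r < a := lt_of_le_of_ne (le_of_not_gt hlt) (fun h => heq h.symm)
          rw [show subsetMerge (r :: rs) (a :: as) = false by
            simp [subsetMerge, hlt, heq]]
          rw [Bool.eq_iff_iff]
          simp only [List.all_eq_true, List.contains_iff_mem]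
          constructor
          · intro h; exact absurd h (by simp)
          · intro h
            have hmem := h r List.mem_cons_self
            rcases List.mem_cons.mp hmem with h1 | h2
            · exact absurd h1.symm heq
            · exact absurd (lt_of_lt_of_le hgt (hale r h2)) (lt_irrefl r)

-- membership in A's fold of Set.update
theorem mem_foldl_update {β : Type} (tasks : List β) (g : β → List String)
    (s : PySem.Set String) (x : String) :
    (x ∈ tasks.foldl (fun s t => PySem.Set.update s (g t)) s) ↔ (x ∈ s ∨ ∃ t ∈ tasks, x ∈ g t) := by
  induction tasks generalizing s with
  | nil => simp
  | cons t ts ih =>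
    simp only [List.foldl_cons, ih, PySem.Set.mem_update, List.mem_cons]
    constructor
    · rintro ((h | h) | ⟨u, hu, hx⟩)
      · exact Or.inl h
      · exact Or.inr ⟨t, Or.inl rfl, h⟩
      · exact Or.inr ⟨u, Or.inr hu, hx⟩
    · rintro (h | ⟨u, (rfl | hu), hx⟩)
      · exact Or.inl (Or.inl h)
      · exact Or.inl (Or.inr hx)
      · exact Or.inr ⟨u, hu, hx⟩

-- ===== VERDICT =====
theorem check_resource_availability_py_spec : Claim_equal_check_resource_availability_py := by
  intro plan available _
  unfold Spec_check_resource_availability_py check_resource_availability_py check_resource_availability_py_alt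
  rw [subsetMerge_eq_all _ _ (PySem.List.sorted_pairwise _ _) (PySem.List.sorted_pairwise _ _)]
  rw [Bool.eq_iff_iff]
  simp only [List.all_eq_true, List.contains_iff_mem, PySem.List.mem_sorted,
    PySem.Set.mem_ofList, mem_foldl_update, List.mem_flatMap, PySem.Set.empty,
    List.not_mem_nil, false_or]
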